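-- pv_equiv track=rewrite | github.com/fromerosk/google_foobar | google_chalenges_2/l2/lovely-lucky-lambs/lovely-lucky-lambs.py | handout_stingy
-- ===== SOURCE A (Python) =====
-- def handout_stingy(total_lambs):
--     if total_lambs < 3:
--         return total_lambs
--
--     total_paid_henchman = 2
--     available_lamb = total_lambs - 2
--     paid_henchman1_price = 1
--     paid_henchman2_price = 1
--
--     next_henchman_price =  2
--
--     while next_henchman_price <= available_lamb:
--         total_paid_henchman += 1
--         available_lamb -= next_henchman_price
--         paid_henchman1_price, paid_henchman2_price = paid_henchman2_price, next_henchman_price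
--         next_henchman_price =  paid_henchman1_price + paid_henchman2_price
--
--     return total_paid_henchman
-- ===== SOURCE B (Python) =====
-- def count_fibs(a, b, limit):
--     # number of Fibonacci values <= limit in the sequence a, b, a+b, ...
--     if a > limit:
--         return 0
--     return 1 + count_fibs(b, a + b, limit)
--
-- def handout_stingy(total_lambs):
--     if total_lambs < 3:
--         return total_lambs
--     # greedy prices are the Fibonacci numbers 1,1,2,3,...; the sum of the first
--     # k of them is F(k+2)-1, so k henchmen are payable iff F(k+2) <= total_lambs+1:
--     # the answer is (how many Fibonacci numbers are <= total_lambs+1) minus 2.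
--     return count_fibs(1, 1, total_lambs + 1) - 2
-- ===== Notes on version B (the rewrite author's own statement) =====
-- stated objective: alternative
-- what changed: Replaces A's iterative balance-decrementing greedy loop by a recursive count of Fibonacci numbers <= total_lambs+1 (using sum of first k Fibonacci numbers = F(k+2)-1), building the result on return (1 + recurse) with no balance or counter accumulator; answer is that count minus 2.
import Mathlib
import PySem

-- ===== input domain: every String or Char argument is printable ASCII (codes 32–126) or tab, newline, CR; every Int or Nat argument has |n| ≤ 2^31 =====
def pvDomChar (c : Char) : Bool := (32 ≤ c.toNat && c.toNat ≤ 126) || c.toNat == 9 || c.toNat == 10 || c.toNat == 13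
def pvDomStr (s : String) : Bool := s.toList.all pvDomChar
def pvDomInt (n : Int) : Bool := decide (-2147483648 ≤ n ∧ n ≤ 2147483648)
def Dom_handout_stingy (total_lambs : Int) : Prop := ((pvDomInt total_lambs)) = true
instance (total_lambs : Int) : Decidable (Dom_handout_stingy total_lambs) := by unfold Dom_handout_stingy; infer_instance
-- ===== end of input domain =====

-- B replaces A's iterative balance-decrementing greedy loop by a recursive count of the
-- Fibonacci numbers ≤ total_lambs+1 (sum of first k Fibonacci numbers = F(k+2)-1) minus 2;
-- alternative decomposition, same cost.

-- ===== PORT A =====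
-- A's while loop; the Nat fuel only makes the recursion total: from A's initial state the
-- balance shrinks by next ≥ 2 each pass, so fuel (total_lambs-2).toNat is never exhausted
-- while the loop condition holds.
def handoutLoopA : Nat → Int → Int → Int → Int → Int → Int
  | 0, count, _, _, _, _ => count
  | fuel + 1, count, avail, _p1, p2, next =>
    if next ≤ avail then
      handoutLoopA fuel (count + 1) (avail - next) p2 next (p2 + next)
    else count

def handout_stingy (total_lambs : Int) : Int :=
  if total_lambs < 3 then total_lambs
  else handoutLoopA (total_lambs - 2).toNat 2 (total_lambs - 2) 1 1 2

-- ===== PORT B =====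
-- B's count_fibs recursion, building the result on return; the Nat fuel only makes it
-- total: at the j-th call a = F(j+1) ≥ j, so fuel (limit+1).toNat outlasts a ≤ limit.
def countFibs : Nat → Int → Int → Int → Int
  | 0, _, _, _ => 0
  | fuel + 1, a, b, limit =>
    if a > limit then 0
    else 1 + countFibs fuel b (a + b) limit

def handout_stingy_alt (total_lambs : Int) : Int :=
  if total_lambs < 3 then total_lambs
  else countFibs (total_lambs + 2).toNat 1 1 (total_lambs + 1) - 2

-- ===== PRECONDITION & SPEC =====
def Spec_handout_stingy (total_lambs : Int) (out : Int) : Prop := out = handout_stingy_alt total_lambs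
instance (total_lambs : Int) (out : Int) : Decidable (Spec_handout_stingy total_lambs out) := by unfold Spec_handout_stingy; infer_instance

-- ===== CLAIM (what is proved, stated in full; the proofs are below) =====
def Claim_equal_handout_stingy : Prop := ∀ (total_lambs : Int), Dom_handout_stingy total_lambs → Spec_handout_stingy total_lambs (handout_stingy total_lambs)

-- ===== LEMMAS AND PROOFS =====

-- Bridge: A's state (count, avail, p2, n) after k passes corresponds to B's recursion four
-- calls ahead: a = F(k+5) = p2 + 2n, b = F(k+6) = 2p2 + 3n, limit = avail + p2 + n; the two
-- stopping conditions then coincide (n ≤ avail), each remaining pass of A matches one call of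
-- B, and avail.toNat bounds the remaining passes, so any fuels at least avail.toNat agree.
theorem handout_bridge (fA : ℕ) : ∀ (fB : ℕ) (c avail p1 p2 n : Int),
    avail.toNat ≤ fA → avail.toNat ≤ fB → 1 ≤ p2 → p2 ≤ n →
    handoutLoopA fA c avail p1 p2 n
      = c + countFibs fB (p2 + 2 * n) (2 * p2 + 3 * n) (avail + p2 + n) := by
  induction fA with
  | zero =>
    intro fB c avail p1 p2 n hA hB h1 h2
    cases fB with
    | zero => simp only [handoutLoopA, countFibs]; omega
    | succ fB =>
      simp only [handoutLoopA, countFibs]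
      rw [if_pos (by omega : p2 + 2 * n > avail + p2 + n)]
      omega
  | succ fA ih =>
    intro fB c avail p1 p2 n hA hB h1 h2
    by_cases hc : n ≤ avail
    · cases fB with
      | zero => omega
      | succ fB =>
        simp only [handoutLoopA, countFibs]
        rw [if_pos hc, if_neg (by omega : ¬ p2 + 2 * n > avail + p2 + n)]
        have := ih fB (c + 1) (avail - n) p2 n (p2 + n)
          (by omega) (by omega) (by omega) (by omega)
        rw [this]
        ring_nf
    · cases fB with
      | zero =>
        simp only [handoutLoopA, countFibs]
        rw [if_neg hc]; omega
      | succ fB =>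
        simp only [handoutLoopA, countFibs]
        rw [if_neg hc, if_pos (by omega : p2 + 2 * n > avail + p2 + n)]
        omega

-- ===== VERDICT (by name: the statement is the Claim_ definition above) =====
theorem handout_stingy_spec : Claim_equal_handout_stingy := by
  intro total_lambs _
  unfold Spec_handout_stingy handout_stingy handout_stingy_alt
  by_cases h : total_lambs < 3
  · rw [if_pos h, if_pos h]
  · rw [if_neg h, if_neg h]
    -- unroll B's recursion four calls from (1,1) to (5,8); limit = total_lambs+1 ≥ 4
    obtain ⟨k, hk⟩ : ∃ k, (total_lambs + 2).toNat = k + 4 :=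
      ⟨(total_lambs + 2).toNat - 4, by omega⟩
    rw [hk]
    simp only [countFibs]
    rw [if_neg (by omega : ¬ (1:Int) > total_lambs + 1),
        if_neg (by omega : ¬ (1:Int) > total_lambs + 1),
        if_neg (by omega : ¬ (1:Int) + 1 > total_lambs + 1),
        if_neg (by omega : ¬ (1:Int) + (1 + 1) > total_lambs + 1)]
    have hb := handout_bridge (total_lambs - 2).toNat k 2 (total_lambs - 2) 1 1 2
      (le_refl _) (by omega) (by omega) (by omega)
    rw [show total_lambs - 2 + 1 + 2 = total_lambs + 1 from by ring] at hb
    norm_num at hb ⊢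
    omega
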